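-- pv_equiv track=rewrite | github.com/momentous-developments/flutter-showcase-app | mock_api/endpoints/users.py | generate_permissions_for_role
-- ===== SOURCE A (Python) =====
-- def generate_permissions_for_role(role: str) -> dict:
--     """Generate permissions based on role"""
--     base_permissions = {
--         "users": {"read": True, "write": False, "delete": False},
--         "courses": {"read": True, "write": False, "delete": False},
--         "products": {"read": True, "write": False, "delete": False},
--         "orders": {"read": True, "write": False, "delete": False},
--         "invoices": {"read": True, "write": False, "delete": False},
--         "reports": {"read": True, "write": False, "delete": False}
--     }
--
--     if role == "admin":
--         # Admin has all permissions
--         for module in base_permissions: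
--             base_permissions[module] = {"read": True, "write": True, "delete": True}
--     elif role == "editor":
--         # Editor can read and write
--         for module in base_permissions:
--             base_permissions[module]["write"] = True
--     elif role == "moderator":
--         # Moderator has specific permissions
--         base_permissions["users"]["write"] = True
--         base_permissions["courses"]["write"] = True
--         base_permissions["products"]["write"] = True
--
--     return base_permissions
-- ===== SOURCE B (Python) =====
-- def generate_permissions_for_role(role: str) -> dict:
--     """Generate permissions based on role"""
--     modules = ["users", "courses", "products", "orders", "invoices", "reports"]
--     moderator_writable = {"users", "courses", "products"}
--
--     def module_permissions(module):
--         if role == "admin":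
--             return {"read": True, "write": True, "delete": True}
--         if role == "editor":
--             return {"read": True, "write": True, "delete": False}
--         if role == "moderator":
--             return {"read": True, "write": module in moderator_writable, "delete": False}
--         return {"read": True, "write": False, "delete": False}
--
--     return {module: module_permissions(module) for module in modules}
-- ===== Notes on version B (the rewrite author's own statement) =====
-- stated objective: simpler
-- what changed: Instead of building a default permission dict and then mutating it per role, B loops once over the fixed module list and constructs each module's permission dict directly from the role (with a set of moderator-writable modules), assembling the result in one dict comprehension.
import Mathlib
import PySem

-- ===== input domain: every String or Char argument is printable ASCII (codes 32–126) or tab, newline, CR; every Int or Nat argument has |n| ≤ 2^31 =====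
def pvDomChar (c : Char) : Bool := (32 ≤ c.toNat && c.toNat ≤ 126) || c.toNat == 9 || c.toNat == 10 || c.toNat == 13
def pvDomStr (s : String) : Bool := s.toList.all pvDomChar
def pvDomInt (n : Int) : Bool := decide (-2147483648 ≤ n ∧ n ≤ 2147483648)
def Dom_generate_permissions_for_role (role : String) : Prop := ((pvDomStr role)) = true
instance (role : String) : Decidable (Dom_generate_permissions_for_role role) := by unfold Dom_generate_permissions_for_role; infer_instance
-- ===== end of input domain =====

-- B builds each module's permission dict directly from the role in one pass over the
-- module list, instead of A's build-defaults-then-mutate-per-role; objective: simpler.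

-- ===== PORT A =====
def pvDefaultPerm : PySem.Dict String Bool :=
  PySem.Dict.ofList [("read", true), ("write", false), ("delete", false)]

def pvAdminPerm : PySem.Dict String Bool :=
  PySem.Dict.ofList [("read", true), ("write", true), ("delete", true)]

def generate_permissions_for_role (role : String) : List (String × List (String × Bool)) :=
  let base : PySem.Dict String (PySem.Dict String Bool) :=
    PySem.Dict.ofList
      [("users", pvDefaultPerm), ("courses", pvDefaultPerm), ("products", pvDefaultPerm),
       ("orders", pvDefaultPerm), ("invoices", pvDefaultPerm), ("reports", pvDefaultPerm)]
  let base :=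
    if role = "admin" then
      -- for module in base_permissions: base_permissions[module] = {all True}
      base.keys.foldl (fun d m => d.insert m pvAdminPerm) base
    else if role = "editor" then
      -- for module in base_permissions: base_permissions[module]["write"] = True
      base.keys.foldl (fun d m => d.modify m PySem.Dict.empty (fun p => p.insert "write" true)) base
    else if role = "moderator" then
      ((base.modify "users" PySem.Dict.empty (fun p => p.insert "write" true)).modify
          "courses" PySem.Dict.empty (fun p => p.insert "write" true)).modify
        "products" PySem.Dict.empty (fun p => p.insert "write" true)
    else base
  base.items.map (fun kv => (kv.1, kv.2.items))

-- ===== PORT B =====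
def pvModules : List String := ["users", "courses", "products", "orders", "invoices", "reports"]

def pvModeratorWritable : PySem.Set String := PySem.Set.ofList ["users", "courses", "products"]

def pvModulePermissions (role module : String) : PySem.Dict String Bool :=
  if role = "admin" then PySem.Dict.ofList [("read", true), ("write", true), ("delete", true)]
  else if role = "editor" then PySem.Dict.ofList [("read", true), ("write", true), ("delete", false)]
  else if role = "moderator" then
    PySem.Dict.ofList [("read", true), ("write", PySem.Set.contains pvModeratorWritable module), ("delete", false)]
  else PySem.Dict.ofList [("read", true), ("write", false), ("delete", false)]

def generate_permissions_for_role_alt (role : String) : List (String × List (String × Bool)) :=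
  pvModules.map (fun m => (m, (pvModulePermissions role m).items))

-- ===== PRECONDITION & SPEC =====
def Spec_generate_permissions_for_role (role : String) (out : List (String × List (String × Bool))) : Prop := out = generate_permissions_for_role_alt role
instance (role : String) (out : List (String × List (String × Bool))) : Decidable (Spec_generate_permissions_for_role role out) := by unfold Spec_generate_permissions_for_role; infer_instance

-- ===== CLAIM (what is proved, stated in full; the proofs are below) =====
def Claim_equal_generate_permissions_for_role : Prop := ∀ (role : String), Dom_generate_permissions_for_role role → Spec_generate_permissions_for_role role (generate_permissions_for_role role)

-- ===== LEMMAS AND PROOFS =====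

-- ===== VERDICT (by name: the statement is the Claim_ definition above) =====
theorem generate_permissions_for_role_spec : Claim_equal_generate_permissions_for_role := by
  intro role _
  unfold Spec_generate_permissions_for_role
  by_cases h1 : role = "admin"
  · subst h1; decide
  · by_cases h2 : role = "editor"
    · subst h2; decide
    · by_cases h3 : role = "moderator"
      · subst h3; decide
      · simp [generate_permissions_for_role, generate_permissions_for_role_alt,
              pvModulePermissions, if_neg h1, if_neg h2, if_neg h3]
        decide
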